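-- pv_equiv track=rewrite | github.com/cloutsocks/actor-bot | bot/jam.py | drums_as_text
-- ===== SOURCE A (Python) =====
-- def drums_as_text(drums, ticks):
--     if not drums:
--         return 'None'
--
--     chunks = []
--     for i in range(0, len(drums), ticks):
--         chunk = ''
--         for j in range(i, min(len(drums), i+ticks)):
--             if len(drums[j]) == 1:
--                 chunk += drums[j]
--             else:
--                 chunk += f"[{drums[j]}]"
--
--         chunks.append(f'`{chunk}`')
--
--     # chunks = [f'`{melody[i:i + ticks]}`' for i in range(0, len(melody), ticks)]
--     return ' '.join(chunks)
-- ===== SOURCE B (Python) =====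
-- def drums_as_text(drums, ticks):
--     if not drums:
--         return 'None'
--     out = '`'
--     cnt = 0
--     for d in drums:
--         if cnt == ticks:
--             out += '` `'
--             cnt = 0
--         out += d if len(d) == 1 else '[' + d + ']'
--         cnt += 1
--     return out + '`'
-- ===== Notes on version B (the rewrite author's own statement) =====
-- stated objective: simpler
-- what changed: B streams the drums once with a running counter, emitting a '` `' chunk separator into one growing output string whenever the counter reaches ticks, instead of A's nested index loops that build a list of chunk strings from range starts and join them.
-- outside the precondition, e.g. on drums_as_text(['a'], -1): A returns '', B returns '`a`'; on drums_as_text(['a'], 0): A raises ValueError, B returns '`` `a`'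
import Mathlib
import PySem

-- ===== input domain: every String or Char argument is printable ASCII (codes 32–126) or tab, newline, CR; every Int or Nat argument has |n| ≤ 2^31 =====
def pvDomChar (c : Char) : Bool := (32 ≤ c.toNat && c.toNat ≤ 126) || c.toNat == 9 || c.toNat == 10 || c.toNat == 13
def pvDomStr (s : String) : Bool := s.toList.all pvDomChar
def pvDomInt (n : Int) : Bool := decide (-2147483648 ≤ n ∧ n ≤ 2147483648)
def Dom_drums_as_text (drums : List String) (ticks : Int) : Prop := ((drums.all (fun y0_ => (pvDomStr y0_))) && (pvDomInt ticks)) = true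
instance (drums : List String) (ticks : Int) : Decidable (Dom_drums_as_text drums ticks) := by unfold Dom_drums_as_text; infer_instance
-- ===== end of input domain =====

-- B streams the drums once with a running counter emitting chunk separators, instead of A's nested
-- index loops over range starts; objective: simpler. Equivalence is on the return value.

-- ===== PORT A =====
-- strings are accumulated as List Char (PySem.Chars), exact for Python's str concatenation
def drums_as_text (drums : List String) (ticks : Int) : String :=
  if drums = [] then "None"
  else
    String.ofList (PySem.Chars.join [' ']
      ((PySem.List.pyRange 0 (PySem.List.len drums) ticks).foldl
        (fun chunks i =>
          chunks ++
            ['`' ::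
              ((PySem.List.pyRange i (min (PySem.List.len drums) (i + ticks)) 1).foldl
                (fun chunk j =>
                  if PySem.Str.len (PySem.List.pyGetD drums j "") = 1 then
                    chunk ++ (PySem.List.pyGetD drums j "").toList
                  else
                    chunk ++ ('[' :: (PySem.List.pyGetD drums j "").toList ++ [']'])) [])
              ++ ['`']]) []))

-- ===== PORT B =====
-- one pass: out starts as '`'; when the counter reaches ticks a '` `' separator is emitted and the
-- counter resets; each drum appends its token; a final '`' closes the last chunk
def drums_as_text_alt (drums : List String) (ticks : Int) : String :=
  if drums = [] then "None"
  else
    String.ofList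
      ((drums.foldl
        (fun (s : List Char × Int) d =>
          let out := if s.2 = ticks then s.1 ++ ['`', ' ', '`'] else s.1
          let cnt : Int := if s.2 = ticks then 0 else s.2
          (out ++ (if PySem.Str.len d = 1 then d.toList else '[' :: d.toList ++ [']']), cnt + 1))
        (['`'], 0)).1 ++ ['`'])

-- ===== PRECONDITION & SPEC =====
-- Pre_ excludes ticks = 0 with nonempty drums, where Python's range(0, len, 0) raises ValueError,
-- and negative ticks with nonempty drums: a degenerate chunk size nobody would specify, on which
-- A's no-chunks result ('') and B's render-everything-in-one-chunk result are both arbitrary.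
def Pre_drums_as_text (drums : List String) (ticks : Int) : Prop := drums = [] ∨ 0 < ticks
instance (drums : List String) (ticks : Int) : Decidable (Pre_drums_as_text drums ticks) := by unfold Pre_drums_as_text; infer_instance
def pvWitness_drums_as_text : List String × Int := (["a", "bc"], 2)

def Spec_drums_as_text (drums : List String) (ticks : Int) (out : String) : Prop := out = drums_as_text_alt drums ticks
instance (drums : List String) (ticks : Int) (out : String) : Decidable (Spec_drums_as_text drums ticks out) := by unfold Spec_drums_as_text; infer_instance

-- ===== CLAIM (what is proved, stated in full; the proofs are below) =====
def Claim_equal_drums_as_text : Prop := ∀ (drums : List String) (ticks : Int), Dom_drums_as_text drums ticks → Pre_drums_as_text drums ticks → Spec_drums_as_text drums ticks (drums_as_text drums ticks)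

-- ===== LEMMAS AND PROOFS =====

-- the token formatter both programs share (A and B inline it)
def pvTok (d : String) : List Char :=
  if PySem.Str.len d = 1 then d.toList else '[' :: d.toList ++ [']']

-- the chunk decomposition both results are reduced to: blocks of t+1 consecutive tokens
def pvChunks {α : Type} (t : Nat) (l : List α) : List (List α) :=
  if h : l = [] then [] else l.take (t + 1) :: pvChunks t (l.drop (t + 1))
termination_by l.length
decreasing_by
  have : l.length ≠ 0 := fun h0 => h (List.eq_nil_of_length_eq_zero h0)
  simp only [List.length_drop]; omega

-- B's loop body, written as structural recursion on the token list (c = current counter value)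
def pvRend (t : Int) : List (List Char) → Int → List Char
  | [], _ => []
  | x :: xs, c =>
      (if c = t then ['`', ' ', '`'] else []) ++ x ++ pvRend t xs (if c = t then 1 else c + 1)

-- what pvRend does from a freshly filled chunk boundary
def pvRendTail (t : Int) : List (List Char) → List Char
  | [] => []
  | x :: xs => ['`', ' ', '`'] ++ x ++ pvRend t xs 1

-- separator-joined chunk contents
def pvTl : List (List (List Char)) → List Char
  | [] => []
  | x :: xs => ['`', ' ', '`'] ++ x.flatten ++ pvTl xs

def pvSJ : List (List (List Char)) → List Char
  | [] => []
  | x :: xs => x.flatten ++ pvTl xs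

lemma pyRange_pos_nil (a b s : Int) (hs : 0 < s) (h : b ≤ a) :
    PySem.List.pyRange a b s = [] := by
  rw [PySem.List.pyRange_of_pos a b hs, if_neg (by omega)]
  rfl

lemma pyRange_shift (n s : Int) (hs : 0 < s) :
    PySem.List.pyRange s n s = (PySem.List.pyRange 0 (n - s) s).map (· + s) := by
  rw [PySem.List.pyRange_of_pos s n hs, PySem.List.pyRange_of_pos 0 (n - s) hs, List.map_map]
  have hif : (if s < n then ((n - s + s - 1) / s).toNat else 0)
      = (if 0 < n - s then ((n - s - 0 + s - 1) / s).toNat else 0) := by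
    by_cases h : s < n
    · rw [if_pos h, if_pos (by omega)]; ring_nf
    · rw [if_neg h, if_neg (by omega)]
  rw [hif]
  refine List.map_congr_left fun k _ => ?_
  simp; ring

lemma pyRange_pos_cons (n s : Int) (hs : 0 < s) (hn : 0 < n) :
    PySem.List.pyRange 0 n s = 0 :: PySem.List.pyRange s n s := by
  rw [PySem.List.pyRange_of_pos 0 n hs, PySem.List.pyRange_of_pos s n hs, if_pos (by omega)]
  have hcount : ((n - 0 + s - 1) / s).toNat
      = (if s < n then ((n - s + s - 1) / s).toNat else 0) + 1 := by
    by_cases h : s < n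
    · rw [if_pos h]
      have h1 : n - 0 + s - 1 = (n - s + s - 1) + 1 * s := by ring
      have h2 : (n - 0 + s - 1) / s = (n - s + s - 1) / s + 1 := by
        rw [h1, Int.add_mul_ediv_right _ _ (by omega)]
      have h3 : 0 ≤ (n - s + s - 1) / s := Int.ediv_nonneg (by omega) (by omega)
      omega
    · rw [if_neg h]
      have h1 : (n - 0 + s - 1) / s = 1 := by
        have hlo : 1 * s ≤ n - 0 + s - 1 := by omega
        have hhi : n - 0 + s - 1 < 2 * s := by omega
        have := Int.le_ediv_iff_mul_le (a := 1) (b := n - 0 + s - 1) hs |>.2 (by omega)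
        have := Int.ediv_lt_iff_lt_mul (a := n - 0 + s - 1) (b := 2) hs |>.2 (by omega)
        omega
      rw [h1]; rfl
  rw [hcount, List.range_succ_eq_map, List.map_cons]
  refine congrArg₂ _ (by ring) ?_
  rw [List.map_map]
  refine List.map_congr_left fun k _ => ?_
  simp; ring

-- one slice at a shifted start is a slice of the dropped list
lemma slice_shift {α : Type} (xs : List α) (i s : Int) (hi : 0 ≤ i) (hs : 0 < s) :
    PySem.List.slice xs (some (i + s)) (some (i + s + s))
      = PySem.List.slice (xs.drop s.toNat) (some i) (some (i + s)) := by
  rw [PySem.List.slice_toNat xs (by omega) (by omega),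
    PySem.List.slice_toNat (xs.drop s.toNat) hi (by omega), List.drop_drop]
  have h1 : s.toNat + i.toNat = (i + s).toNat := by omega
  have h2 : (i + s + s).toNat - (i + s).toNat = (i + s).toNat - i.toNat := by omega
  rw [h1, h2]

-- A's list of slices, chunked
lemma A_chunks (ticks : Int) (ht : 0 < ticks) :
    ∀ toks : List (List Char),
      (PySem.List.pyRange 0 (toks.length : Int) ticks).map
          (fun i => PySem.List.slice toks (some i) (some (i + ticks)))
        = pvChunks (ticks.toNat - 1) toks := by
  intro toks
  by_cases h : toks = []
  · subst h
    simp only [List.length_nil, Nat.cast_zero]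
    rw [pyRange_pos_nil 0 0 ticks ht (by omega), pvChunks]
    simp
  · have hlen : 0 < (toks.length : Int) := by
      have := List.length_pos_iff.2 h; omega
    rw [pyRange_pos_cons _ _ ht hlen, pyRange_shift _ _ ht, List.map_cons, List.map_map]
    rw [pvChunks, dif_neg h]
    have htn : ticks.toNat - 1 + 1 = ticks.toNat := by omega
    refine congrArg₂ _ ?_ ?_
    · rw [PySem.List.slice_zero_start, zero_add, PySem.List.slice_to _ (by omega), htn]
    · have hstep : ((PySem.List.pyRange 0 ((toks.length : Int) - ticks) ticks).map
          ((fun i => PySem.List.slice toks (some i) (some (i + ticks))) ∘ (· + ticks)))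
          = (PySem.List.pyRange 0 ((toks.length : Int) - ticks) ticks).map
            (fun i => PySem.List.slice (toks.drop ticks.toNat) (some i) (some (i + ticks))) := by
        refine List.map_congr_left fun i hi => ?_
        rw [PySem.List.mem_pyRange_iff_of_pos ht] at hi
        obtain ⟨h0, -, -⟩ := hi
        simpa using slice_shift toks i ticks h0 ht
      rw [hstep]
      have hlen2 : ((toks.drop ticks.toNat).length : Int) = max ((toks.length : Int) - ticks) 0 := by
        simp only [List.length_drop]; omega
      by_cases hc : ticks < (toks.length : Int)
      · have : ((toks.drop ticks.toNat).length : Int) = (toks.length : Int) - ticks := by omega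
        rw [← this, A_chunks ticks ht (toks.drop ticks.toNat), htn]
      · rw [pyRange_pos_nil _ _ _ ht (by omega)]
        have hnil : toks.drop (ticks.toNat - 1 + 1) = [] := by
          rw [htn]; apply List.drop_eq_nil_of_le; omega
        rw [hnil, pvChunks]
        simp
termination_by toks => toks.length
decreasing_by
  have : toks.length ≠ 0 := fun h0 => h (List.eq_nil_of_length_eq_zero h0)
  simp only [List.length_drop]; omega

-- B's foldl, unfolded into pvRend
lemma B_foldl (ticks : Int) (ds : List String) :
    ∀ (out : List Char) (c : Int),
      (ds.foldl
        (fun (s : List Char × Int) d =>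
          let out := if s.2 = ticks then s.1 ++ ['`', ' ', '`'] else s.1
          let cnt : Int := if s.2 = ticks then 0 else s.2
          (out ++ (if PySem.Str.len d = 1 then d.toList else '[' :: d.toList ++ [']']), cnt + 1))
        (out, c)).1 = out ++ pvRend ticks (ds.map pvTok) c := by
  induction ds with
  | nil => intro out c; simp [pvRend]
  | cons d ds ih =>
      intro out c
      simp only [List.foldl_cons, List.map_cons, pvRend]
      by_cases h : c = ticks
      · rw [if_pos h, if_pos h, ih]
        simp [pvTok, h]
      · rw [if_neg h, if_neg h, ih]
        simp [pvTok, h]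

lemma pvRend_full (ticks : Int) (l : List (List Char)) :
    pvRend ticks l ticks = pvRendTail ticks l := by
  cases l with
  | nil => rfl
  | cons x xs => simp [pvRend, pvRendTail]

-- one chunk of k remaining slots, counter at ticks - k
lemma pvRend_block (ticks : Int) (_ht : 0 < ticks) (k : Nat) (hk : 0 < k)
    (hkt : (k : Int) ≤ ticks) :
    ∀ l : List (List Char),
      pvRend ticks l (ticks - k) = (l.take k).flatten ++ pvRendTail ticks (l.drop k) := by
  induction k with
  | zero => omega
  | succ k ih =>
      intro l
      cases l with
      | nil => simp [pvRend, pvRendTail]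
      | cons x xs =>
          have hne : ticks - (k + 1 : Nat) ≠ ticks := by push_cast; omega
          rw [pvRend, if_neg hne, if_neg hne]
          rcases Nat.eq_zero_or_pos k with hk0 | hkpos
          · subst hk0
            have h1 : ticks - (0 + 1 : Nat) + 1 = ticks := by omega
            rw [h1, pvRend_full]
            simp
          · have h1 : ticks - (k + 1 : Nat) + 1 = ticks - k := by push_cast; omega
            rw [h1, ih hkpos (by push_cast at hkt ⊢; omega) xs]
            simp

-- pvRendTail processes the rest chunk by chunk
lemma pvRendTail_chunks (ticks : Int) (ht : 0 < ticks) :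
    ∀ l : List (List Char), pvRendTail ticks l = pvTl (pvChunks (ticks.toNat - 1) l) := by
  intro l
  cases l with
  | nil => rw [pvChunks]; simp [pvRendTail, pvTl]
  | cons x xs =>
      have htn : ticks.toNat - 1 + 1 = ticks.toNat := by omega
      rw [pvChunks, dif_neg (by simp), pvTl, pvRendTail]
      by_cases h1 : ticks = 1
      · subst h1
        have hr : pvRend 1 xs 1 = pvRendTail 1 xs := pvRend_full 1 xs
        rw [hr, pvRendTail_chunks 1 (by omega) xs]
        simp [List.take_succ_cons, List.drop_succ_cons]
      · have h2 : (1 : Int) = ticks - (ticks.toNat - 1 : Nat) := by omega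
        rw [h2, pvRend_block ticks ht (ticks.toNat - 1) (by omega) (by omega) xs,
          pvRendTail_chunks ticks ht (xs.drop (ticks.toNat - 1))]
        simp [List.take_succ_cons, List.drop_succ_cons, List.append_assoc]
termination_by l => l.length
decreasing_by
  · simp
  · simp only [List.length_drop, List.length_cons]; omega

-- the whole of B's rendering is the separator-join of the chunks
lemma pvRend_chunks (ticks : Int) (ht : 0 < ticks) (l : List (List Char)) :
    pvRend ticks l 0 = pvSJ (pvChunks (ticks.toNat - 1) l) := by
  have h0 : (0 : Int) = ticks - ticks.toNat := by omega
  rw [h0, pvRend_block ticks ht ticks.toNat (by omega) (by omega) l]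
  cases l with
  | nil => rw [pvChunks]; simp [pvRendTail, pvSJ]
  | cons x xs =>
      have htn : ticks.toNat - 1 + 1 = ticks.toNat := by omega
      rw [pvChunks, dif_neg (by simp), pvSJ, htn,
        pvRendTail_chunks ticks ht ((x :: xs).drop ticks.toNat)]

-- A's space-join of backtick-wrapped chunks, against the flat form
lemma join_wrap (l : List (List (List Char))) (hl : l ≠ []) :
    PySem.Chars.join [' '] (l.map (fun c => '`' :: c.flatten ++ ['`']))
      = '`' :: (pvSJ l ++ ['`']) := by
  cases l with
  | nil => exact absurd rfl hl
  | cons x xs =>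
      induction xs generalizing x with
      | nil => simp [PySem.Chars.join, List.intercalate, pvSJ, pvTl]
      | cons y ys ih =>
          have hjoin : PySem.Chars.join [' ']
              ((x :: y :: ys).map (fun c => '`' :: c.flatten ++ ['`']))
              = ('`' :: x.flatten ++ ['`']) ++ [' ']
                ++ PySem.Chars.join [' '] ((y :: ys).map (fun c => '`' :: c.flatten ++ ['`'])) := by
            simp [PySem.Chars.join, List.intercalate]
          rw [hjoin, ih y (by simp)]
          simp [pvSJ, pvTl]

-- ===== VERDICT (by name: the statement is the Claim_ definition above) =====
theorem drums_as_text_spec : Claim_equal_drums_as_text := by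
  intro drums ticks _ hpre
  unfold Spec_drums_as_text
  by_cases hd : drums = []
  · simp only [drums_as_text, drums_as_text_alt, if_pos hd]
  · have ht : 0 < ticks := hpre.resolve_left hd
    simp only [drums_as_text, drums_as_text_alt, if_neg hd]
    rw [B_foldl]
    congr 1
    -- A's outer loop is a map over the range starts
    rw [PySem.List.foldl_append_singleton_eq_map, List.nil_append]
    -- A's inner loop: rewrite to appending whole tokens, then to a flattened slice
    have hfun : ∀ i : Int, ((PySem.List.pyRange i (min (PySem.List.len drums) (i + ticks)) 1).foldl
        (fun chunk j =>
          if PySem.Str.len (PySem.List.pyGetD drums j "") = 1 then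
            chunk ++ (PySem.List.pyGetD drums j "").toList
          else chunk ++ ('[' :: (PySem.List.pyGetD drums j "").toList ++ [']'])) [])
        = (PySem.List.pyRange i (min (PySem.List.len drums) (i + ticks)) 1).foldl
            (fun chunk j => chunk ++ pvTok (PySem.List.pyGetD drums j "")) [] := by
      intro i
      refine PySem.List.foldl_congr_mem _ _ _ _ (fun c j _ => ?_)
      simp only [pvTok]; split <;> rfl
    have hchunk : ∀ i : Int, 0 ≤ i → i < PySem.List.len drums →
        (PySem.List.pyRange i (min (PySem.List.len drums) (i + ticks)) 1).foldl
          (fun chunk j => chunk ++ pvTok (PySem.List.pyGetD drums j "")) []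
        = (PySem.List.slice (drums.map pvTok) (some i) (some (i + ticks))).flatten := by
      intro i h0 hiL
      rw [PySem.List.foldl_append_eq_flatMap, List.nil_append, List.flatMap_def]
      congr 1
      -- the inner range of tokens is a slice of the token list
      have h1 : i ≤ min (PySem.List.len drums) (i + ticks) := by omega
      have h2 : min (PySem.List.len drums) (i + ticks) ≤ PySem.List.len drums := by omega
      have hsimp : (fun j => pvTok (PySem.List.pyGetD drums j ""))
          = (fun j => PySem.List.pyGetD (drums.map pvTok) j (pvTok "")) := by
        funext j; rw [PySem.List.pyGetD_map]
      rw [hsimp]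
      have hlen2 : PySem.List.len (drums.map pvTok) = PySem.List.len drums := by
        simp [PySem.List.len_eq]
      have hfull : (PySem.List.pyRange i (PySem.List.len (drums.map pvTok))).map
          (fun j => PySem.List.pyGetD (drums.map pvTok) j (pvTok ""))
          = (drums.map pvTok).drop i.toNat := PySem.List.map_pyGetD_pyRange _ _ h0
      rw [hlen2,
        PySem.List.pyRange_one_append i (min (PySem.List.len drums) (i + ticks))
          (PySem.List.len drums) h1 h2, List.map_append] at hfull
      have htake := congrArg (List.take ((PySem.List.pyRange i
          (min (PySem.List.len drums) (i + ticks)) 1).map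
          (fun j => PySem.List.pyGetD (drums.map pvTok) j (pvTok ""))).length) hfull
      rw [List.take_left] at htake
      rw [htake, PySem.List.slice_toNat (a := i) (b := i + ticks) (drums.map pvTok) h0 (by omega),
        List.take_eq_take_iff]
      simp only [List.length_map, PySem.List.length_pyRange_one, List.length_drop,
        PySem.List.len_eq] at *
      omega
    have hmap : ((PySem.List.pyRange 0 (PySem.List.len drums) ticks).map
        (fun i => '`' ::
          ((PySem.List.pyRange i (min (PySem.List.len drums) (i + ticks)) 1).foldl
            (fun chunk j =>
              if PySem.Str.len (PySem.List.pyGetD drums j "") = 1 then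
                chunk ++ (PySem.List.pyGetD drums j "").toList
              else chunk ++ ('[' :: (PySem.List.pyGetD drums j "").toList ++ [']'])) [])
          ++ ['`']))
        = ((PySem.List.pyRange 0 (PySem.List.len drums) ticks).map
            (fun i => PySem.List.slice (drums.map pvTok) (some i) (some (i + ticks)))).map
          (fun c => '`' :: c.flatten ++ ['`']) := by
      rw [List.map_map]
      refine List.map_congr_left fun i hi => ?_
      rw [PySem.List.mem_pyRange_iff_of_pos ht] at hi
      obtain ⟨h0, hiL, -⟩ := hi
      simp only [Function.comp]
      rw [hfun i, hchunk i h0 hiL]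
    rw [hmap]
    have hlen3 : PySem.List.len drums = ((drums.map pvTok).length : Int) := by
      simp [PySem.List.len_eq]
    rw [hlen3, A_chunks ticks ht (drums.map pvTok)]
    have hne : pvChunks (ticks.toNat - 1) (drums.map pvTok) ≠ [] := by
      rw [pvChunks, dif_neg (by simpa using hd)]
      simp
    rw [join_wrap _ hne, pvRend_chunks ticks ht (drums.map pvTok)]
    simp
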